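-- pv_equiv track=rewrite | github.com/srimuthu/FSLM-Erika | flex_prio_tool/hptAnalyzer.py | responseMSRP
-- ===== SOURCE A (Python) =====
-- MAX_SIMULATION_TIME = 100000
--
-- T3_CT   = 5000
--
-- def responseMSRP(windowMSRP, at3):
--     t3rt = 0
--     returnValue = MAX_SIMULATION_TIME
--     for i in range(MAX_SIMULATION_TIME):
--         if (i > windowMSRP[0]) and (i <= windowMSRP[1]):
--             t3rt += 1
--         if (t3rt >= T3_CT):
--             returnValue = i - at3
--             break
--
--     return returnValue
-- ===== SOURCE B (Python) =====
-- MAX_SIMULATION_TIME = 100000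
--
-- T3_CT = 5000
--
-- def responseMSRP(windowMSRP, at3):
--     # closed form: the T3_CT-th integer i in [0, MAX) with windowMSRP[0] < i <= windowMSRP[1]
--     start = max(0, windowMSRP[0] + 1)
--     stop = min(MAX_SIMULATION_TIME, windowMSRP[1] + 1)
--     hit = start + T3_CT - 1
--     if hit < stop:
--         return hit - at3
--     return MAX_SIMULATION_TIME
-- ===== Notes on version B (the rewrite author's own statement) =====
-- stated objective: simpler
-- what changed: Replaces the 100000-iteration counting loop by closed-form arithmetic: the 5000th qualifying integer is max(0,w0+1)+4999, returned iff it lies below min(100000,w1+1).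
-- outside the precondition, e.g. on responseMSRP([99999], 0): A returns 100000, B raises IndexError
import Mathlib
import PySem

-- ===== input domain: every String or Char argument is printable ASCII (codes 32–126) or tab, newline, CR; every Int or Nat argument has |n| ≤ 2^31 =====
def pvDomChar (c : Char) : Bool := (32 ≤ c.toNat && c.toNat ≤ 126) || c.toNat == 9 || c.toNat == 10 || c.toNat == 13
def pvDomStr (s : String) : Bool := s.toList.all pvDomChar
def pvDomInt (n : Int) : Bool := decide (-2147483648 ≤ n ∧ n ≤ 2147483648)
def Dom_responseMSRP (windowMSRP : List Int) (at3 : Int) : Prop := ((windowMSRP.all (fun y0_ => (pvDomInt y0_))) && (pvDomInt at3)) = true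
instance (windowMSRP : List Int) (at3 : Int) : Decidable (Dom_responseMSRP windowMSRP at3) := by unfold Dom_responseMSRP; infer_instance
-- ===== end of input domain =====

-- B replaces A's 100000-iteration counting loop by closed-form arithmetic (objective: simpler).

-- ===== PORT A =====
-- the for-loop with break: i runs upward, t3rt is the counter
def loopA (windowMSRP : List Int) (at3 : Int) (i : Nat) (t3rt : Int) : Int :=
  if _h : i < 100000 then
    let t3rt' :=
      if ((i : Int) > (PySem.List.pyGet? windowMSRP 0).getD 0 ∧
          (i : Int) ≤ (PySem.List.pyGet? windowMSRP 1).getD 0) then t3rt + 1 else t3rt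
    if t3rt' ≥ 5000 then (i : Int) - at3
    else loopA windowMSRP at3 (i + 1) t3rt'
  else 100000
termination_by 100000 - i

def responseMSRP (windowMSRP : List Int) (at3 : Int) : Int :=
  loopA windowMSRP at3 0 0

-- ===== PORT B =====
def responseMSRP_alt (windowMSRP : List Int) (at3 : Int) : Int :=
  let start := max 0 ((PySem.List.pyGet? windowMSRP 0).getD 0 + 1)
  let stop := min 100000 ((PySem.List.pyGet? windowMSRP 1).getD 0 + 1)
  let hit := start + 5000 - 1
  if hit < stop then hit - at3 else 100000

-- ===== PRECONDITION & SPEC =====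
-- Pre_ requires two window endpoints, since A indexes windowMSRP[0] and windowMSRP[1] (IndexError
-- otherwise); it thereby also excludes the accidental one-element case windowMSRP = [w0] with
-- w0 ≥ 99999, where A's short-circuit `and` never reaches windowMSRP[1] and returns 100000
-- while B raises IndexError.
def Pre_responseMSRP (windowMSRP : List Int) (at3 : Int) : Prop := 2 ≤ windowMSRP.length
instance (windowMSRP : List Int) (at3 : Int) : Decidable (Pre_responseMSRP windowMSRP at3) := by
  unfold Pre_responseMSRP; infer_instance
def pvWitness_responseMSRP : List Int × Int := ([3, 7000], 2)
def Spec_responseMSRP (windowMSRP : List Int) (at3 : Int) (out : Int) : Prop := out = responseMSRP_alt windowMSRP at3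
instance (windowMSRP : List Int) (at3 : Int) (out : Int) : Decidable (Spec_responseMSRP windowMSRP at3 out) := by unfold Spec_responseMSRP; infer_instance

-- ===== CLAIM (what is proved, stated in full; the proofs are below) =====
def Claim_equal_responseMSRP : Prop := ∀ (windowMSRP : List Int) (at3 : Int), Dom_responseMSRP windowMSRP at3 → Pre_responseMSRP windowMSRP at3 → Spec_responseMSRP windowMSRP at3 (responseMSRP windowMSRP at3)

-- ===== LEMMAS AND PROOFS =====

-- invariant: at position i with t3rt = number of qualifying j < i, and the loop not yet broken,
-- the loop returns B's closed form.
theorem loopA_closed (windowMSRP : List Int) (at3 w0 w1 : Int)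
    (h0 : (PySem.List.pyGet? windowMSRP 0).getD 0 = w0)
    (h1 : (PySem.List.pyGet? windowMSRP 1).getD 0 = w1) :
    ∀ (n i : Nat) (t3rt : Int), 100000 - i = n → i ≤ 100000 →
      t3rt = max 0 (min (i : Int) (w1 + 1) - max 0 (w0 + 1)) → t3rt < 5000 →
      loopA windowMSRP at3 i t3rt =
        if max 0 (w0 + 1) + 4999 < min 100000 (w1 + 1)
        then max 0 (w0 + 1) + 4999 - at3 else 100000 := by
  intro n
  induction n with
  | zero =>
      intro i t3rt hn hi ht hlt
      have hie : i = 100000 := by omega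
      subst hie
      rw [loopA]
      rw [dif_neg (by omega)]
      rw [if_neg (by push_cast at ht; omega)]
  | succ n ih =>
      intro i t3rt hn hi ht hlt
      have hi' : i < 100000 := by omega
      rw [loopA, dif_pos hi', h0, h1]
      by_cases hq : ((i : Int) > w0 ∧ (i : Int) ≤ w1)
      · rw [if_pos hq]
        by_cases hb : t3rt + 1 ≥ 5000
        · rw [if_pos hb]
          -- the break fires exactly at the 5000th qualifying i
          obtain ⟨hq1, hq2⟩ := hq
          rw [if_pos (by omega)]
          congr 1
          omega
        · rw [if_neg hb]
          exact ih (i + 1) (t3rt + 1) (by omega) (by omega) (by push_cast; push_cast at ht; omega) (by omega)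
      · rw [if_neg hq]
        rw [if_neg (by omega)]
        have hq' : ¬((i : Int) > w0 ∧ (i : Int) ≤ w1) := hq
        exact ih (i + 1) t3rt (by omega) (by omega) (by push_cast; push_cast at ht; omega) hlt

-- ===== VERDICT (by name: the statement is the Claim_ definition above) =====
theorem responseMSRP_spec : Claim_equal_responseMSRP := by
  intro windowMSRP at3 _ _
  unfold Spec_responseMSRP responseMSRP responseMSRP_alt
  rw [loopA_closed windowMSRP at3 _ _ rfl rfl 100000 0 0 rfl (by omega) (by omega) (by omega)]
  dsimp only
  split <;> split <;> omega
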